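-- pv_equiv track=rewrite | github.com/pypi-data/pypi-mirror-367 | packages/custom-base-django/custom_base_django-0.1.9-py3-none-any.whl/custom_base_django/management/commands/load_data.py | sort_self_fk_records
-- ===== SOURCE A (Python) =====
-- from collections import defaultdict, deque
--
-- def sort_self_fk_records(records, fk_field_name, pk_name):
--     by_pk = {}
--     children_map = defaultdict(list)
--     roots = []
--
--     for record in records:
--         pk = record.get(pk_name)
--         parent_id = record.get(fk_field_name)
--         by_pk[pk] = record
--         if parent_id:
--             children_map[parent_id].append(pk)
--         else:
--             roots.append(pk)
--
--     sorted_pks = []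
--     visited = set()
--
--     def visit(pk):
--         if pk in visited:
--             return
--         visited.add(pk)
--         for child_pk in children_map.get(pk, []):
--             visit(child_pk)
--         sorted_pks.append(pk)
--
--     for root_pk in roots:
--         visit(root_pk)
--
--     return [by_pk[pk] for pk in reversed(sorted_pks)]
-- ===== SOURCE B (Python) =====
-- def sort_self_fk_records(records, fk_field_name, pk_name):
--     # Staged passes instead of A's single build loop, then an iterative
--     # explicit-stack DFS instead of A's recursive visit().
--     by_pk = {r.get(pk_name): r for r in records}
--     pairs = [(r.get(fk_field_name), r.get(pk_name)) for r in records]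
--     roots = [pk for par, pk in pairs if not par]
--     children_map = {}
--     for par, pk in pairs:
--         if par:
--             children_map.setdefault(par, []).append(pk)
--
--     sorted_pks = []
--     visited = set()
--     for root_pk in roots:
--         if root_pk in visited:
--             continue
--         visited.add(root_pk)
--         stack = [(root_pk, 0)]
--         while stack:
--             pk, i = stack.pop()
--             children = children_map.get(pk, ())
--             if i < len(children):
--                 stack.append((pk, i + 1))
--                 child = children[i]
--                 if child not in visited:
--                     visited.add(child)
--                     stack.append((child, 0))
--             else:
--                 sorted_pks.append(pk)
--
--     return [by_pk[pk] for pk in reversed(sorted_pks)]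
-- ===== Notes on version B (the rewrite author's own statement) =====
-- stated objective: alternative
-- what changed: A's single build loop becomes staged comprehension passes (dict/list comprehensions plus a grouping loop over precomputed (parent, pk) pairs), and A's recursive postorder visit() becomes an iterative DFS over an explicit stack of (pk, next-child-index) frames with visited marked at push time, producing the identical order without Python recursion.
import Mathlib
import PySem

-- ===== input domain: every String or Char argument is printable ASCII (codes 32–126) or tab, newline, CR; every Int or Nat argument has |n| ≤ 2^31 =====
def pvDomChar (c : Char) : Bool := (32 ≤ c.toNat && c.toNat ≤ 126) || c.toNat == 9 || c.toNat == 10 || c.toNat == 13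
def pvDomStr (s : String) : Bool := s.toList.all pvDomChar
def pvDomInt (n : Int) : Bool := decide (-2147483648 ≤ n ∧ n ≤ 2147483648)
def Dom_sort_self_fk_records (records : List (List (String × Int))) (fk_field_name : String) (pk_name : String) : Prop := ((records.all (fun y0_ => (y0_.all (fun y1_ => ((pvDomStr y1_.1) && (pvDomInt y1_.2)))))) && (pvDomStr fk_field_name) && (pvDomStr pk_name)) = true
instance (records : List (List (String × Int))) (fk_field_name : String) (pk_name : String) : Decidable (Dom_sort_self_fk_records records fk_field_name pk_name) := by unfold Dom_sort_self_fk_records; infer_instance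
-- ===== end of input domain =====

-- B replaces A's single build loop by staged comprehension-style passes and A's
-- recursive postorder visit() by an iterative DFS over an explicit stack of
-- (pk, next-child-index) frames; objective: alternative (same asymptotic cost).

-- ===== PORT A =====
-- `if parent_id:` — truthiness of an Optional[int]
def pvTruthy : Option Int → Bool
  | none => false
  | some v => v != 0

-- record.get(name) on the record dict (first-match lookup per the dict convention)
def pvGetField (record : List (String × Int)) (name : String) : Option Int :=
  (PySem.Dict.mk record).get? name

-- loop body of A's `for record in records:` loop
def pvBuildStep (fk_field_name pk_name : String)
    (st : PySem.Dict (Option Int) (List (String × Int)) ×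
          PySem.Dict (Option Int) (List (Option Int)) × List (Option Int))
    (record : List (String × Int)) :
    PySem.Dict (Option Int) (List (String × Int)) ×
    PySem.Dict (Option Int) (List (Option Int)) × List (Option Int) :=
  let pk := pvGetField record pk_name
  let parent_id := pvGetField record fk_field_name
  let by_pk := st.1.insert pk record
  if pvTruthy parent_id then
    (by_pk, st.2.1.modify parent_id [] (fun l => l ++ [pk]), st.2.2)
  else
    (by_pk, st.2.1, st.2.2 ++ [pk])

-- A's first loop: builds (by_pk, children_map, roots) in one pass
def pvBuild (records : List (List (String × Int))) (fk_field_name pk_name : String) :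
    PySem.Dict (Option Int) (List (String × Int)) ×
    PySem.Dict (Option Int) (List (Option Int)) × List (Option Int) :=
  records.foldl (pvBuildStep fk_field_name pk_name) (PySem.Dict.empty, PySem.Dict.empty, [])

-- A's recursive visit(pk) acting on the state (visited, sorted_pks); fuel makes the
-- recursion total (any fuel > number of records is enough, proved below)
def pvVisitA (cm : PySem.Dict (Option Int) (List (Option Int))) :
    Nat → Option Int → PySem.Set (Option Int) × List (Option Int) →
    PySem.Set (Option Int) × List (Option Int)
  | 0, _, st => st
  | f+1, pk, st =>
    if PySem.Set.contains st.1 pk then st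
    else
      let st1 := (PySem.Dict.getD cm pk []).foldl (fun s c => pvVisitA cm f c s)
        (PySem.Set.add st.1 pk, st.2)
      (st1.1, st1.2 ++ [pk])

def sort_self_fk_records (records : List (List (String × Int))) (fk_field_name : String) (pk_name : String) : List (List (String × Int)) :=
  let b := pvBuild records fk_field_name pk_name
  let by_pk := b.1
  let children_map := b.2.1
  let roots := b.2.2
  let run := roots.foldl (fun st root_pk => pvVisitA children_map (records.length + 1) root_pk st) ([], [])
  (run.2.reverse).map (fun pk => PySem.Dict.getD by_pk pk [])

-- ===== PORT B =====
-- B's inner `while stack:` loop; a frame (pk, i) means: children i.. of pk are still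
-- to be expanded; fuel makes the loop total (a quadratic bound is enough, proved below)
def pvMachineB (cm : PySem.Dict (Option Int) (List (Option Int))) :
    Nat → List (Option Int × Nat) → PySem.Set (Option Int) × List (Option Int) →
    PySem.Set (Option Int) × List (Option Int)
  | 0, _, st => st
  | _+1, [], st => st
  | f+1, fr :: rest, st =>
    let children := PySem.Dict.getD cm fr.1 []
    if h : fr.2 < children.length then
      let child := children[fr.2]
      if PySem.Set.contains st.1 child then
        pvMachineB cm f ((fr.1, fr.2 + 1) :: rest) st
      else
        pvMachineB cm f ((child, 0) :: (fr.1, fr.2 + 1) :: rest) (PySem.Set.add st.1 child, st.2)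
    else
      pvMachineB cm f rest (st.1, st.2 ++ [fr.1])

def sort_self_fk_records_alt (records : List (List (String × Int))) (fk_field_name : String) (pk_name : String) : List (List (String × Int)) :=
  -- staged builds: dict comprehension, pair list, root filter, grouping loop
  let by_pk := records.foldl
    (fun d r => d.insert ((PySem.Dict.mk r).get? pk_name) r) PySem.Dict.empty
  let pairs := records.map
    (fun r => ((PySem.Dict.mk r).get? fk_field_name, (PySem.Dict.mk r).get? pk_name))
  let roots := pairs.filterMap (fun p => if p.1.getD 0 != 0 then none else some p.2)
  let children_map := pairs.foldl
    (fun d p => if p.1.getD 0 != 0 then d.modify p.1 [] (fun l => l ++ [p.2]) else d)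
    PySem.Dict.empty
  -- iterative DFS, visited marked at push time
  let run := roots.foldl (fun st root_pk =>
    if PySem.Set.contains st.1 root_pk then st
    else pvMachineB children_map ((records.length + 1) * (records.length + 3))
      [(root_pk, 0)] (PySem.Set.add st.1 root_pk, st.2)) ([], [])
  (run.2.reverse).map (fun pk => PySem.Dict.getD by_pk pk [])

-- ===== PRECONDITION & SPEC =====
def Spec_sort_self_fk_records (records : List (List (String × Int))) (fk_field_name : String) (pk_name : String) (out : List (List (String × Int))) : Prop := out = sort_self_fk_records_alt records fk_field_name pk_name
instance (records : List (List (String × Int))) (fk_field_name : String) (pk_name : String) (out : List (List (String × Int))) : Decidable (Spec_sort_self_fk_records records fk_field_name pk_name out) := by unfold Spec_sort_self_fk_records; infer_instance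

-- ===== CLAIM (what is proved, stated in full; the proofs are below) =====
def Claim_equal_sort_self_fk_records : Prop := ∀ (records : List (List (String × Int))) (fk_field_name : String) (pk_name : String), Dom_sort_self_fk_records records fk_field_name pk_name → Spec_sort_self_fk_records records fk_field_name pk_name (sort_self_fk_records records fk_field_name pk_name)

-- ===== LEMMAS AND PROOFS =====

-- the list of all pk values of the records: every key ever visited belongs to it
def pvAllPks (records : List (List (String × Int))) (pk_name : String) : List (Option Int) :=
  records.map (fun record => pvGetField record pk_name)

-- the (parent_id, pk) pairs appended into children_map, in order
def pvPairs (records : List (List (String × Int))) (fk_field_name pk_name : String) :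
    List (Option Int × Option Int) :=
  records.filterMap (fun record =>
    if pvTruthy (pvGetField record fk_field_name) then
      some (pvGetField record fk_field_name, pvGetField record pk_name)
    else none)

-- number of keys of Ks not yet visited
def pvMu (Ks vis : List (Option Int)) : Nat := (Ks.toFinset \ vis.toFinset).card

-- termination potential of B's machine
def pvPhi (cm : PySem.Dict (Option Int) (List (Option Int))) (n : Nat)
    (Ks : List (Option Int)) (stack : List (Option Int × Nat)) (vis : List (Option Int)) : Nat :=
  (stack.map (fun fr => (PySem.Dict.getD cm fr.1 []).length + 1 - fr.2)).sum + pvMu Ks vis * (n + 2)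

-- what processing one frame (pk, i) does to the state, expressed with A's visit
def pvResume (cm : PySem.Dict (Option Int) (List (Option Int))) (fA : Nat)
    (st : PySem.Set (Option Int) × List (Option Int)) (fr : Option Int × Nat) :
    PySem.Set (Option Int) × List (Option Int) :=
  let st1 := ((PySem.Dict.getD cm fr.1 []).drop fr.2).foldl (fun s c => pvVisitA cm fA c s) st
  (st1.1, st1.2 ++ [fr.1])

-- generic foldl preservation
theorem pvFoldlPres {α σ : Type} (g : σ → α → σ) (Q : σ → Prop)
    (l : List α) (h : ∀ s a, a ∈ l → Q s → Q (g s a)) :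
    ∀ s, Q s → Q (l.foldl g s) := by
  induction l with
  | nil => intro s hs; simpa using hs
  | cons a l ih =>
    intro s hs
    simp only [List.foldl_cons]
    exact ih (fun s b hb => h s b (List.mem_cons_of_mem _ hb)) _ (h s a (List.mem_cons_self) hs)

theorem pv_build_split (records : List (List (String × Int))) (fk_field_name pk_name : String) :
    ∀ b0 c0 r0, records.foldl (pvBuildStep fk_field_name pk_name) (b0, c0, r0) =
      (records.foldl (fun d record => d.insert (pvGetField record pk_name) record) b0,
       (pvPairs records fk_field_name pk_name).foldl
         (fun d p => d.modify p.1 [] (fun l => l ++ [p.2])) c0,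
       r0 ++ records.filterMap (fun record =>
         if pvTruthy (pvGetField record fk_field_name) then none
         else some (pvGetField record pk_name))) := by
  induction records with
  | nil => intro b0 c0 r0; simp [pvPairs]
  | cons record records ih =>
    intro b0 c0 r0
    simp only [List.foldl_cons, pvPairs, List.filterMap_cons]
    by_cases h : pvTruthy (pvGetField record fk_field_name)
    · simp only [pvBuildStep, h, if_pos, ih, pvPairs, List.foldl_cons]
    · simp only [pvBuildStep, h, if_neg, Bool.false_eq_true, not_false_iff, ih, pvPairs,
        List.append_assoc, List.singleton_append]

-- `not par` / `par` truthiness expressed through Option.getD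
theorem pv_truthy_getD (o : Option Int) : (o.getD 0 != 0) = pvTruthy o := by
  cases o <;> simp [pvTruthy]

-- B's staged by_pk pass equals A's by_pk component
theorem pv_by_pk_alt (records : List (List (String × Int))) (fk_field_name pk_name : String) :
    records.foldl (fun d r => d.insert ((PySem.Dict.mk r).get? pk_name) r) PySem.Dict.empty =
      (pvBuild records fk_field_name pk_name).1 := by
  unfold pvBuild
  rw [pv_build_split]
  rfl

-- B's root comprehension equals A's roots component
theorem pv_roots_alt (records : List (List (String × Int))) (fk_field_name pk_name : String) :
    (records.map (fun r => ((PySem.Dict.mk r).get? fk_field_name, (PySem.Dict.mk r).get? pk_name))).filterMap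
        (fun p => if p.1.getD 0 != 0 then none else some p.2) =
      (pvBuild records fk_field_name pk_name).2.2 := by
  unfold pvBuild
  rw [pv_build_split, List.filterMap_map]
  simp only [List.nil_append]
  apply List.filterMap_congr
  intro r _
  simp [Function.comp, pv_truthy_getD, pvGetField]

-- B's grouping loop over the pair list equals A's children_map component
theorem pvGetField_def (r : List (String × Int)) (n : String) :
    (PySem.Dict.mk r).get? n = pvGetField r n := rfl

theorem pv_filter_fold (l : List (Option Int × Option Int)) :
    ∀ d : PySem.Dict (Option Int) (List (Option Int)),
      l.foldl (fun d p => if p.1.getD 0 != 0 then d.modify p.1 [] (fun t => t ++ [p.2]) else d) d =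
      (l.filter (fun p => p.1.getD 0 != 0)).foldl
        (fun d p => d.modify p.1 [] (fun t => t ++ [p.2])) d := by
  induction l with
  | nil => intro d; rfl
  | cons p l ih =>
    intro d
    simp only [List.foldl_cons, List.filter_cons]
    by_cases h : (p.1.getD 0 != 0) = true
    · rw [if_pos h, if_pos h, List.foldl_cons]
      exact ih _
    · rw [if_neg h, if_neg h]
      exact ih _

theorem pv_pairs_filter (records : List (List (String × Int))) (fk_field_name pk_name : String) :
    (records.map (fun r => ((PySem.Dict.mk r).get? fk_field_name, (PySem.Dict.mk r).get? pk_name))).filter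
        (fun p => p.1.getD 0 != 0) =
      pvPairs records fk_field_name pk_name := by
  induction records with
  | nil => rfl
  | cons r records ih =>
    simp only [List.map_cons, List.filter_cons, pvPairs, List.filterMap_cons, pvGetField_def,
      pv_truthy_getD] at ih ⊢
    by_cases h : pvTruthy (pvGetField r fk_field_name) = true
    · simp [h, ih]
    · simp [h, ih]

theorem pv_children_alt (records : List (List (String × Int))) (fk_field_name pk_name : String) :
    (records.map (fun r => ((PySem.Dict.mk r).get? fk_field_name, (PySem.Dict.mk r).get? pk_name))).foldl
        (fun d p => if p.1.getD 0 != 0 then d.modify p.1 [] (fun l => l ++ [p.2]) else d)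
        PySem.Dict.empty =
      (pvBuild records fk_field_name pk_name).2.1 := by
  unfold pvBuild
  rw [pv_build_split]
  dsimp only
  rw [pv_filter_fold, pv_pairs_filter]

theorem pv_cm_getD (records : List (List (String × Int))) (fk_field_name pk_name : String)
    (k : Option Int) :
    PySem.Dict.getD (pvBuild records fk_field_name pk_name).2.1 k [] =
      ((pvPairs records fk_field_name pk_name).filter (fun p => p.1 == k)).map (fun p => p.2) := by
  unfold pvBuild
  rw [pv_build_split]
  simp [PySem.Dict.getD_foldl_modify_append]

theorem pv_cm_mem (records : List (List (String × Int))) (fk_field_name pk_name : String)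
    (k c : Option Int) (hc : c ∈ PySem.Dict.getD (pvBuild records fk_field_name pk_name).2.1 k []) :
    c ∈ pvAllPks records pk_name := by
  rw [pv_cm_getD] at hc
  simp only [List.mem_map, List.mem_filter] at hc
  obtain ⟨p, ⟨hp, _⟩, rfl⟩ := hc
  unfold pvPairs at hp
  simp only [List.mem_filterMap] at hp
  obtain ⟨record, hrec, hsome⟩ := hp
  split at hsome
  · cases hsome
    exact List.mem_map_of_mem hrec
  · cases hsome

theorem pv_cm_len (records : List (List (String × Int))) (fk_field_name pk_name : String)
    (k : Option Int) :
    (PySem.Dict.getD (pvBuild records fk_field_name pk_name).2.1 k []).length ≤ records.length := by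
  rw [pv_cm_getD]
  have h1 : (((pvPairs records fk_field_name pk_name).filter (fun p => p.1 == k)).map (fun p => p.2)).length ≤ (pvPairs records fk_field_name pk_name).length := by
    rw [List.length_map]; exact List.length_filter_le _ _
  exact le_trans h1 (List.length_filterMap_le _ _)

theorem pv_roots_mem (records : List (List (String × Int))) (fk_field_name pk_name : String)
    (r : Option Int) (hr : r ∈ (pvBuild records fk_field_name pk_name).2.2) :
    r ∈ pvAllPks records pk_name := by
  unfold pvBuild at hr
  rw [pv_build_split] at hr
  simp only [List.nil_append, List.mem_filterMap] at hr
  obtain ⟨record, hrec, hsome⟩ := hr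
  split at hsome
  · cases hsome
  · cases hsome
    exact List.mem_map_of_mem hrec

theorem pv_mu_le (Ks vis : List (Option Int)) : pvMu Ks vis ≤ Ks.length := by
  unfold pvMu
  calc (Ks.toFinset \ vis.toFinset).card ≤ Ks.toFinset.card :=
        Finset.card_le_card (Finset.sdiff_subset)
    _ ≤ Ks.length := List.toFinset_card_le Ks

theorem pv_mu_mono (Ks vis vis' : List (Option Int)) (h : ∀ x ∈ vis, x ∈ vis') :
    pvMu Ks vis' ≤ pvMu Ks vis := by
  unfold pvMu
  apply Finset.card_le_card
  apply Finset.sdiff_subset_sdiff (Finset.Subset.refl _)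
  intro x hx
  rw [List.mem_toFinset] at hx ⊢
  exact h x hx

theorem pv_mu_lt (Ks vis : List (Option Int)) (pk : Option Int)
    (hpk : pk ∈ Ks) (hvis : pk ∉ vis) : pvMu Ks (PySem.Set.add vis pk) < pvMu Ks vis := by
  unfold pvMu
  apply Finset.card_lt_card
  rw [Finset.ssubset_iff_of_subset]
  · exact ⟨pk, by simp [hpk, hvis], by simp [hpk, PySem.Set.mem_add]⟩
  · apply Finset.sdiff_subset_sdiff (Finset.Subset.refl _)
    intro x hx
    rw [List.mem_toFinset] at hx ⊢
    rw [PySem.Set.mem_add]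
    exact Or.inl hx

theorem pv_visit_mono (cm : PySem.Dict (Option Int) (List (Option Int))) :
    ∀ (f : Nat) (pk : Option Int) (st : PySem.Set (Option Int) × List (Option Int)),
      ∀ x ∈ st.1, x ∈ (pvVisitA cm f pk st).1 := by
  intro f
  induction f with
  | zero => intro pk st x hx; simpa [pvVisitA] using hx
  | succ f ih =>
    intro pk st x hx
    simp only [pvVisitA]
    split
    · exact hx
    · exact pvFoldlPres _ (fun s => x ∈ s.1) _ (fun s a _ hs => ih a s x hs)
        (PySem.Set.add st.1 pk, st.2) ((PySem.Set.mem_add _ _ _).mpr (Or.inl hx))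

theorem pv_fold_fuel_aux (records : List (List (String × Int))) (fk_field_name pk_name : String)
    (g g' : Nat)
    (hg : ∀ (pk : Option Int) (vis : PySem.Set (Option Int)) (out : List (Option Int)),
      pk ∈ pvAllPks records pk_name →
      pvMu (pvAllPks records pk_name) vis < g → pvMu (pvAllPks records pk_name) vis < g' →
      pvVisitA (pvBuild records fk_field_name pk_name).2.1 g pk (vis, out) =
      pvVisitA (pvBuild records fk_field_name pk_name).2.1 g' pk (vis, out)) :
    ∀ (l : List (Option Int)), (∀ c ∈ l, c ∈ pvAllPks records pk_name) →
    ∀ (st : PySem.Set (Option Int) × List (Option Int)),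
      pvMu (pvAllPks records pk_name) st.1 < g → pvMu (pvAllPks records pk_name) st.1 < g' →
      l.foldl (fun s c => pvVisitA (pvBuild records fk_field_name pk_name).2.1 g c s) st =
      l.foldl (fun s c => pvVisitA (pvBuild records fk_field_name pk_name).2.1 g' c s) st := by
  intro l
  induction l with
  | nil => intro _ st _ _; rfl
  | cons c l ih =>
    intro hl st h1 h2
    simp only [List.foldl_cons]
    have hstep : pvVisitA (pvBuild records fk_field_name pk_name).2.1 g c st =
        pvVisitA (pvBuild records fk_field_name pk_name).2.1 g' c st :=
      hg c st.1 st.2 (hl c List.mem_cons_self) h1 h2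
    rw [hstep]
    have hmono : pvMu (pvAllPks records pk_name)
        (pvVisitA (pvBuild records fk_field_name pk_name).2.1 g' c st).1 ≤
        pvMu (pvAllPks records pk_name) st.1 :=
      pv_mu_mono _ _ _ (pv_visit_mono _ g' c st)
    exact ih (fun d hd => hl d (List.mem_cons_of_mem _ hd)) _
      (lt_of_le_of_lt hmono h1) (lt_of_le_of_lt hmono h2)

theorem pv_visit_fuel (records : List (List (String × Int))) (fk_field_name pk_name : String) :
    ∀ (f f' : Nat) (pk : Option Int) (vis : PySem.Set (Option Int)) (out : List (Option Int)),
      pk ∈ pvAllPks records pk_name →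
      pvMu (pvAllPks records pk_name) vis < f → pvMu (pvAllPks records pk_name) vis < f' →
      pvVisitA (pvBuild records fk_field_name pk_name).2.1 f pk (vis, out) =
      pvVisitA (pvBuild records fk_field_name pk_name).2.1 f' pk (vis, out) := by
  intro f
  induction f with
  | zero => intro f' pk vis out _ h0 _; exact absurd h0 (Nat.not_lt_zero _)
  | succ f ih =>
    intro f' pk vis out hpk hf hf'
    cases f' with
    | zero => exact absurd hf' (Nat.not_lt_zero _)
    | succ f' =>
      simp only [pvVisitA]
      split
      · rfl
      · rename_i hnc
        have hnv : pk ∉ vis := fun hm => hnc ((PySem.Set.contains_iff _ _).mpr hm)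
        have hlt : pvMu (pvAllPks records pk_name) (PySem.Set.add vis pk) <
            pvMu (pvAllPks records pk_name) vis := pv_mu_lt _ _ _ hpk hnv
        have h1 : pvMu (pvAllPks records pk_name) (PySem.Set.add vis pk) < f := by omega
        have h2 : pvMu (pvAllPks records pk_name) (PySem.Set.add vis pk) < f' := by omega
        have := pv_fold_fuel_aux records fk_field_name pk_name f f'
          (fun pk vis out hm ha hb => ih f' pk vis out hm ha hb)
          (PySem.Dict.getD (pvBuild records fk_field_name pk_name).2.1 pk [])
          (fun c hc => pv_cm_mem records fk_field_name pk_name pk c hc)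
          (PySem.Set.add vis pk, out) h1 h2
        rw [this]

theorem pv_visit_fold_fuel (records : List (List (String × Int))) (fk_field_name pk_name : String)
    (g g' : Nat) (l : List (Option Int)) (hl : ∀ c ∈ l, c ∈ pvAllPks records pk_name) :
    ∀ (st : PySem.Set (Option Int) × List (Option Int)),
      pvMu (pvAllPks records pk_name) st.1 < g → pvMu (pvAllPks records pk_name) st.1 < g' →
      l.foldl (fun s c => pvVisitA (pvBuild records fk_field_name pk_name).2.1 g c s) st =
      l.foldl (fun s c => pvVisitA (pvBuild records fk_field_name pk_name).2.1 g' c s) st := by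
  exact pv_fold_fuel_aux records fk_field_name pk_name g g'
    (fun pk vis out hm ha hb => pv_visit_fuel records fk_field_name pk_name g g' pk vis out hm ha hb)
    l hl

theorem pv_sim (records : List (List (String × Int))) (fk_field_name pk_name : String) :
    ∀ (fB : Nat) (stack : List (Option Int × Nat))
      (vis : PySem.Set (Option Int)) (out : List (Option Int)) (fA : Nat),
      (∀ fr ∈ stack, fr.2 ≤ (PySem.Dict.getD (pvBuild records fk_field_name pk_name).2.1 fr.1 []).length) →
      pvPhi (pvBuild records fk_field_name pk_name).2.1 records.length
        (pvAllPks records pk_name) stack vis < fB →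
      pvMu (pvAllPks records pk_name) vis < fA →
      pvMachineB (pvBuild records fk_field_name pk_name).2.1 fB stack (vis, out) =
      stack.foldl (pvResume (pvBuild records fk_field_name pk_name).2.1 fA) (vis, out) := by
  intro fB
  induction fB with
  | zero => intro stack vis out fA _ hPhi _; exact absurd hPhi (Nat.not_lt_zero _)
  | succ fB ih =>
    intro stack vis out fA hstk hPhi hmu
    cases stack with
    | nil => simp [pvMachineB]
    | cons fr rest =>
      have hfA1 : 1 ≤ fA := by omega
      simp only [pvMachineB]
      split
      · rename_i h
        split
        · rename_i hcont
          rw [ih ((fr.1, fr.2 + 1) :: rest) vis out fA ?stk1 ?phi1 hmu]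
          case stk1 =>
            intro fr' hm
            rcases List.mem_cons.mp hm with rfl | hm'
            · exact h
            · exact hstk fr' (List.mem_cons_of_mem _ hm')
          case phi1 =>
            simp only [pvPhi, List.map_cons, List.sum_cons] at hPhi ⊢
            omega
          simp only [List.foldl_cons]
          suffices hx : pvResume (pvBuild records fk_field_name pk_name).2.1 fA (vis, out) (fr.1, fr.2 + 1) =
              pvResume (pvBuild records fk_field_name pk_name).2.1 fA (vis, out) fr by rw [hx]
          unfold pvResume
          dsimp only
          rw [List.drop_eq_getElem_cons h, List.foldl_cons]
          obtain ⟨g, rfl⟩ : ∃ g, fA = g + 1 := ⟨fA - 1, by omega⟩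
          have hv : pvVisitA (pvBuild records fk_field_name pk_name).2.1 (g + 1)
              (PySem.Dict.getD (pvBuild records fk_field_name pk_name).2.1 fr.1 [])[fr.2] (vis, out) = (vis, out) := by
            simp only [pvVisitA]
            rw [if_pos hcont]
          rw [hv]
        · rename_i hncont
          have hcK : (PySem.Dict.getD (pvBuild records fk_field_name pk_name).2.1 fr.1 [])[fr.2] ∈
              pvAllPks records pk_name :=
            pv_cm_mem records fk_field_name pk_name fr.1 _ (List.getElem_mem h)
          have hcnv : (PySem.Dict.getD (pvBuild records fk_field_name pk_name).2.1 fr.1 [])[fr.2] ∉ vis :=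
            fun hm => hncont ((PySem.Set.contains_iff _ _).mpr hm)
          have hlt : pvMu (pvAllPks records pk_name)
              (PySem.Set.add vis (PySem.Dict.getD (pvBuild records fk_field_name pk_name).2.1 fr.1 [])[fr.2]) <
              pvMu (pvAllPks records pk_name) vis := pv_mu_lt _ _ _ hcK hcnv
          rw [ih (((PySem.Dict.getD (pvBuild records fk_field_name pk_name).2.1 fr.1 [])[fr.2], 0) ::
              (fr.1, fr.2 + 1) :: rest)
            (PySem.Set.add vis (PySem.Dict.getD (pvBuild records fk_field_name pk_name).2.1 fr.1 [])[fr.2])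
            out fA ?stk2 ?phi2 (lt_trans hlt hmu)]
          case stk2 =>
            intro fr' hm
            rcases List.mem_cons.mp hm with rfl | hm'
            · exact Nat.zero_le _
            · rcases List.mem_cons.mp hm' with rfl | hm''
              · exact h
              · exact hstk fr' (List.mem_cons_of_mem _ hm'')
          case phi2 =>
            have hlenc : (PySem.Dict.getD (pvBuild records fk_field_name pk_name).2.1
                (PySem.Dict.getD (pvBuild records fk_field_name pk_name).2.1 fr.1 [])[fr.2] []).length ≤
                records.length := pv_cm_len records fk_field_name pk_name _
            have hmul : pvMu (pvAllPks records pk_name)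
                (PySem.Set.add vis (PySem.Dict.getD (pvBuild records fk_field_name pk_name).2.1 fr.1 [])[fr.2]) *
                  (records.length + 2) + (records.length + 2) ≤
                pvMu (pvAllPks records pk_name) vis * (records.length + 2) := by
              have h1 : pvMu (pvAllPks records pk_name)
                  (PySem.Set.add vis (PySem.Dict.getD (pvBuild records fk_field_name pk_name).2.1 fr.1 [])[fr.2]) + 1 ≤
                  pvMu (pvAllPks records pk_name) vis := hlt
              have h2 := Nat.mul_le_mul_right (records.length + 2) h1
              rw [Nat.succ_mul] at h2
              exact h2
            simp only [pvPhi, List.map_cons, List.sum_cons] at hPhi ⊢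
            omega
          simp only [List.foldl_cons]
          obtain ⟨g, rfl⟩ : ∃ g, fA = g + 1 := ⟨fA - 1, by omega⟩
          have hkey : pvResume (pvBuild records fk_field_name pk_name).2.1 (g + 1)
              (PySem.Set.add vis (PySem.Dict.getD (pvBuild records fk_field_name pk_name).2.1 fr.1 [])[fr.2], out)
              ((PySem.Dict.getD (pvBuild records fk_field_name pk_name).2.1 fr.1 [])[fr.2], 0) =
              pvVisitA (pvBuild records fk_field_name pk_name).2.1 (g + 1)
                (PySem.Dict.getD (pvBuild records fk_field_name pk_name).2.1 fr.1 [])[fr.2] (vis, out) := by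
            have hmu2 : pvMu (pvAllPks records pk_name) vis ≤ g := by omega
            unfold pvResume
            dsimp only
            rw [List.drop_zero]
            rw [pv_visit_fold_fuel records fk_field_name pk_name (g + 1) g _
              (fun d hd => pv_cm_mem records fk_field_name pk_name _ d hd) _
              (lt_of_lt_of_le hlt (le_trans hmu2 (Nat.le_succ g)))
              (lt_of_lt_of_le hlt hmu2)]
            conv_rhs => rw [pvVisitA]
            rw [if_neg hncont]
          rw [hkey]
          suffices hx : pvResume (pvBuild records fk_field_name pk_name).2.1 (g + 1)
              (pvVisitA (pvBuild records fk_field_name pk_name).2.1 (g + 1)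
                (PySem.Dict.getD (pvBuild records fk_field_name pk_name).2.1 fr.1 [])[fr.2] (vis, out))
              (fr.1, fr.2 + 1) =
              pvResume (pvBuild records fk_field_name pk_name).2.1 (g + 1) (vis, out) fr by rw [hx]
          unfold pvResume
          dsimp only
          rw [List.drop_eq_getElem_cons h, List.foldl_cons]
      · rename_i h
        rw [List.foldl_cons]
        have hres : pvResume (pvBuild records fk_field_name pk_name).2.1 fA (vis, out) fr =
            (vis, out ++ [fr.1]) := by
          unfold pvResume
          rw [List.drop_eq_nil_of_le (Nat.le_of_not_lt h)]
          rfl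
        rw [hres]
        apply ih rest vis (out ++ [fr.1]) fA (fun fr' hm => hstk fr' (List.mem_cons_of_mem _ hm)) ?_ hmu
        have hfr2 := hstk fr List.mem_cons_self
        simp only [pvPhi, List.map_cons, List.sum_cons] at hPhi ⊢
        omega

theorem pv_runs_eq (records : List (List (String × Int))) (fk_field_name pk_name : String) :
    (pvBuild records fk_field_name pk_name).2.2.foldl
      (fun st root_pk => pvVisitA (pvBuild records fk_field_name pk_name).2.1 (records.length + 1) root_pk st) ([], []) =
    (pvBuild records fk_field_name pk_name).2.2.foldl
      (fun st root_pk =>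
        if PySem.Set.contains st.1 root_pk then st
        else pvMachineB (pvBuild records fk_field_name pk_name).2.1
          ((records.length + 1) * (records.length + 3)) [(root_pk, 0)]
          (PySem.Set.add st.1 root_pk, st.2)) ([], []) := by
  apply PySem.List.foldl_congr_mem
  intro st r hr
  have hrK : r ∈ pvAllPks records pk_name := pv_roots_mem records fk_field_name pk_name r hr
  by_cases hc : PySem.Set.contains st.1 r = true
  · rw [if_pos hc]
    conv_lhs => rw [pvVisitA]
    rw [if_pos hc]
  · rw [if_neg hc]
    have hnv : r ∉ st.1 := fun hm => hc ((PySem.Set.contains_iff _ _).mpr hm)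
    have hmuK : pvMu (pvAllPks records pk_name) st.1 ≤ records.length := by
      have h0 := pv_mu_le (pvAllPks records pk_name) st.1
      simpa [pvAllPks] using h0
    have hlt : pvMu (pvAllPks records pk_name) (PySem.Set.add st.1 r) <
        pvMu (pvAllPks records pk_name) st.1 := pv_mu_lt _ _ _ hrK hnv
    rw [pv_sim records fk_field_name pk_name ((records.length + 1) * (records.length + 3))
      [(r, 0)] (PySem.Set.add st.1 r) st.2 (records.length + 1) ?stk ?phi
      (lt_of_lt_of_le hlt (le_trans hmuK (Nat.le_succ _)))]
    case stk =>
      intro fr hm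
      rw [List.mem_singleton] at hm
      subst hm
      exact Nat.zero_le _
    case phi =>
      simp only [pvPhi, List.map_cons, List.map_nil, List.sum_cons, List.sum_nil]
      have h1 : (PySem.Dict.getD (pvBuild records fk_field_name pk_name).2.1 r []).length ≤
          records.length := pv_cm_len records fk_field_name pk_name r
      have h2 : pvMu (pvAllPks records pk_name) (PySem.Set.add st.1 r) ≤ records.length :=
        le_trans (le_of_lt hlt) hmuK
      have h3 : pvMu (pvAllPks records pk_name) (PySem.Set.add st.1 r) * (records.length + 2) ≤
          records.length * (records.length + 2) := Nat.mul_le_mul_right _ h2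
      have h4 : (records.length + 1) * (records.length + 3) =
          records.length * (records.length + 2) + (2 * records.length + 3) := by ring
      omega
    simp only [List.foldl_cons, List.foldl_nil]
    unfold pvResume
    dsimp only
    rw [List.drop_zero]
    conv_lhs => rw [pvVisitA]
    rw [if_neg hc]
    rw [pv_visit_fold_fuel records fk_field_name pk_name records.length (records.length + 1) _
      (fun d hd => pv_cm_mem records fk_field_name pk_name _ d hd) _
      (lt_of_lt_of_le hlt hmuK)
      (lt_of_lt_of_le hlt (le_trans hmuK (Nat.le_succ _)))]

-- ===== VERDICT (by name: the statement is the Claim_ definition above) =====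
theorem sort_self_fk_records_spec : Claim_equal_sort_self_fk_records := by
  intro records fk_field_name pk_name _
  unfold Spec_sort_self_fk_records sort_self_fk_records sort_self_fk_records_alt
  simp only [pv_by_pk_alt records fk_field_name pk_name,
    pv_roots_alt records fk_field_name pk_name,
    pv_children_alt records fk_field_name pk_name,
    pv_runs_eq records fk_field_name pk_name]
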